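-- pv_equiv track=rewrite | github.com/simoncraig90/poker_game | vision/coinpoker_adapter.py | derive_blinds_from_dealer
-- ===== SOURCE A (Python) =====
-- from typing import Any, Optional
--
-- def derive_blinds_from_dealer(
--     dealer_seat: Optional[int],
--     active_seats: list[int],
-- ) -> tuple[Optional[int], Optional[int]]:
--     """
--     Derive (small_blind_seat, big_blind_seat) from the dealer button position
--     and the list of active seat ids for this hand.
--
--     Why this exists: in CoinPoker's live event stream, ``game.game_alldata``
--     (which carries explicit ``smallBlindSeatId`` / ``bigBlindSeatId`` fields)
--     only fires once per session — at table join. Subsequent hands receive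
--     only ``game.pre_hand_start_info``, which carries ``dealerSeatId`` but
--     not the blind seats. Without this helper the builder's ``bb_seat`` stays
--     fixed to whatever it was on join, so positional output is wrong on every
--     hand after the first.
--
--     Convention:
--         - Heads-up (2 active): dealer is the SB; the other player is the BB.
--         - 3+ handed: SB is the next active seat clockwise (= ascending seat
--           id with wrap) from the dealer; BB is the next active seat after SB.
--         - Dead button is supported: dealer_seat does not have to be active.
--         - Returns (None, None) if we can't derive (no dealer, <2 actives).
--     """
--     if dealer_seat is None or len(active_seats) < 2:
--         return None, None
--     ordered = sorted(active_seats)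
--
--     def _next_active_after(seat: int) -> int:
--         for s in ordered:
--             if s > seat:
--                 return s
--         return ordered[0]  # wrapped
--
--     if len(ordered) == 2:
--         # HU: dealer is SB. If dealer isn't actually in the active list
--         # (dead button HU is rare but possible), fall back to "first active
--         # is SB, other is BB".
--         if dealer_seat in ordered:
--             sb = dealer_seat
--             bb = _next_active_after(sb)
--         else:
--             sb = ordered[0]
--             bb = ordered[1]
--         return sb, bb
--
--     sb = _next_active_after(dealer_seat)
--     bb = _next_active_after(sb)
--     return sb, bb
-- ===== SOURCE B (Python) =====
-- from bisect import bisect_right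
-- from typing import Optional
--
--
-- def derive_blinds_from_dealer(
--     dealer_seat: Optional[int],
--     active_seats: list[int],
-- ) -> tuple[Optional[int], Optional[int]]:
--     """Same derivation, but the clockwise successor is found with a
--     bisect_right binary search (with wrap) instead of a linear scan, and
--     the branches are merged into a single sb/bb return path."""
--     if dealer_seat is None or len(active_seats) < 2:
--         return None, None
--     ordered = sorted(active_seats)
--     n = len(ordered)
--
--     def _succ(seat: int) -> int:
--         return ordered[bisect_right(ordered, seat) % n]
--
--     if n == 2 and dealer_seat not in ordered:
--         # dead button heads-up: first active is SB, other is BB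
--         return ordered[0], ordered[1]
--     sb = dealer_seat if n == 2 else _succ(dealer_seat)
--     return sb, _succ(sb)
-- ===== Notes on version B (the rewrite author's own statement) =====
-- stated objective: idiomatic
-- what changed: The clockwise-successor helper's linear scan over the sorted seats is replaced by a bisect_right binary search with modular wrap, and the heads-up/3+ branches are merged into one sb/bb return path.
import Mathlib
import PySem

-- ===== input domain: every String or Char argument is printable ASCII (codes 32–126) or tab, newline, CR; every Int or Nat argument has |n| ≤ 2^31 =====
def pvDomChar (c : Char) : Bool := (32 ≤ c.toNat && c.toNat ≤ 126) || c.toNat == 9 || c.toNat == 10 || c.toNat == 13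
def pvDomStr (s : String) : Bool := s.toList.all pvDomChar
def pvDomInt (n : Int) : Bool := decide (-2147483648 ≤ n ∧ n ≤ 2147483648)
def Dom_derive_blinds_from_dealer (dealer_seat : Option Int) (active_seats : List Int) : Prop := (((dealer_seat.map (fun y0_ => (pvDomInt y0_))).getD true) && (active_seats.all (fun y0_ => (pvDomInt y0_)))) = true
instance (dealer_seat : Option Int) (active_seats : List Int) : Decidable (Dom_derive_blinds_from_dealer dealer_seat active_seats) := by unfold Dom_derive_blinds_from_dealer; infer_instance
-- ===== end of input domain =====

-- B replaces the linear successor scan with a bisect_right binary search (wrap via % n)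
-- and merges the heads-up / 3+ branches into one sb/bb return path. Return value only; no mutation.

-- ===== PORT A =====
-- 'for s in ordered: if s > seat: return s' — first element strictly greater, else fall through
def nextLoopA (seat : Int) : List Int → Option Int
  | [] => none
  | s :: rest => if seat < s then some s else nextLoopA seat rest

-- _next_active_after: the scan, falling back to ordered[0] (in range: callers pass len ≥ 2)
def nextActiveAfterA (ordered : List Int) (seat : Int) : Int :=
  (nextLoopA seat ordered).getD (ordered.getD 0 0)

def derive_blinds_from_dealer (dealer_seat : Option Int) (active_seats : List Int) : Option Int × Option Int :=
  match dealer_seat with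
  | none => (none, none)
  | some d =>
    if active_seats.length < 2 then (none, none)
    else
      let ordered := PySem.List.sorted active_seats (fun x => x) false
      if ordered.length = 2 then
        if d ∈ ordered then
          let sb := d
          let bb := nextActiveAfterA ordered sb
          (some sb, some bb)
        else
          -- ordered[0], ordered[1]: in range since length = 2
          (some (ordered.getD 0 0), some (ordered.getD 1 0))
      else
        let sb := nextActiveAfterA ordered d
        let bb := nextActiveAfterA ordered sb
        (some sb, some bb)

-- ===== PORT B =====
-- ordered[bisect_right(ordered, seat) % n]: the index is < n, so getD is exact
def succSeatB (ordered : List Int) (seat : Int) : Int :=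
  ordered.getD (PySem.List.bisectRight ordered seat % ordered.length) 0

def derive_blinds_from_dealer_alt (dealer_seat : Option Int) (active_seats : List Int) : Option Int × Option Int :=
  match dealer_seat with
  | none => (none, none)
  | some d =>
    if active_seats.length < 2 then (none, none)
    else
      let ordered := PySem.List.sorted active_seats (fun x => x) false
      let n := ordered.length
      if n = 2 ∧ d ∉ ordered then
        -- dead button heads-up: ordered[0], ordered[1] in range since n = 2
        (some (ordered.getD 0 0), some (ordered.getD 1 0))
      else
        let sb := if n = 2 then d else succSeatB ordered d
        (some sb, some (succSeatB ordered sb))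

-- ===== PRECONDITION & SPEC =====
def Spec_derive_blinds_from_dealer (dealer_seat : Option Int) (active_seats : List Int) (out : Option Int × Option Int) : Prop := out = derive_blinds_from_dealer_alt dealer_seat active_seats
instance (dealer_seat : Option Int) (active_seats : List Int) (out : Option Int × Option Int) : Decidable (Spec_derive_blinds_from_dealer dealer_seat active_seats out) := by unfold Spec_derive_blinds_from_dealer; infer_instance

-- ===== CLAIM (what is proved, stated in full; the proofs are below) =====
def Claim_equal_derive_blinds_from_dealer : Prop := ∀ (dealer_seat : Option Int) (active_seats : List Int), Dom_derive_blinds_from_dealer dealer_seat active_seats → Spec_derive_blinds_from_dealer dealer_seat active_seats (derive_blinds_from_dealer dealer_seat active_seats)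

-- ===== LEMMAS AND PROOFS =====

-- the linear scan returns the element at any index r that splits the list into ≤ seat / > seat
theorem nextLoopA_eq_getElem? (seat : Int) (l : List Int) (r : Nat) (hr : r ≤ l.length)
    (h1 : ∀ j (hj : j < l.length), j < r → l[j] ≤ seat)
    (h2 : ∀ j (hj : j < l.length), r ≤ j → seat < l[j]) :
    nextLoopA seat l = l[r]? := by
  induction l generalizing r with
  | nil => simp [nextLoopA]
  | cons x xs ih =>
    cases r with
    | zero =>
      have hx : seat < x := h2 0 (by simp) (Nat.zero_le _)
      simp [nextLoopA, hx]
    | succ r' =>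
      have hx : x ≤ seat := h1 0 (by simp) (Nat.succ_pos _)
      have : ¬ seat < x := not_lt.mpr hx
      simp only [nextLoopA, if_neg this, List.getElem?_cons_succ]
      exact ih r' (by simpa using hr)
        (fun j hj hjr => h1 (j+1) (by simpa using hj) (by omega))
        (fun j hj hjr => h2 (j+1) (by simpa using hj) (by omega))

-- on a sorted nonempty list the two successor helpers agree
theorem nextActiveAfterA_eq_succSeatB (ordered : List Int) (seat : Int)
    (hs : ordered.Pairwise (fun a b => a ≤ b)) (hne : ordered ≠ []) :
    nextActiveAfterA ordered seat = succSeatB ordered seat := by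
  obtain ⟨hle, h1, h2⟩ := PySem.List.bisectRight_spec ordered seat hs
  set r := PySem.List.bisectRight ordered seat with hrdef
  have hlin := nextLoopA_eq_getElem? seat ordered r hle (fun j hj hjr => h1 j hj hjr)
    (fun j hj hjr => h2 j hj hjr)
  have hlen : 0 < ordered.length := List.length_pos_iff.mpr hne
  unfold nextActiveAfterA succSeatB
  rcases Nat.lt_or_ge r ordered.length with hlt | hge
  · rw [hlin, List.getElem?_eq_getElem hlt, Nat.mod_eq_of_lt hlt]
    simp [List.getD, List.getElem?_eq_getElem hlt]
  · have hr : r = ordered.length := le_antisymm hle hge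
    have hm : PySem.List.bisectRight ordered seat % ordered.length = 0 := by
      rw [← hrdef, hr, Nat.mod_self]
    rw [hlin, hr, hm]
    simp [List.getD]

-- ===== VERDICT (by name: the statement is the Claim_ definition above) =====
theorem derive_blinds_from_dealer_spec : Claim_equal_derive_blinds_from_dealer := by
  intro dealer_seat active_seats _hdom
  unfold Spec_derive_blinds_from_dealer derive_blinds_from_dealer derive_blinds_from_dealer_alt
  cases dealer_seat with
  | none => rfl
  | some d =>
    by_cases hlen : active_seats.length < 2
    · simp [hlen]
    · simp only [if_neg hlen]
      set ordered := PySem.List.sorted active_seats (fun x => x) false with hord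
      have hp : ordered.Pairwise (fun a b => a ≤ b) := PySem.List.sorted_pairwise active_seats (fun x => x)
      have hlo : 2 ≤ ordered.length := by
        rw [hord, PySem.List.length_sorted]; omega
      have hne : ordered ≠ [] := by
        intro h; rw [h] at hlo; simp at hlo
      have hsucc : ∀ s, nextActiveAfterA ordered s = succSeatB ordered s :=
        fun s => nextActiveAfterA_eq_succSeatB ordered s hp hne
      by_cases h2 : ordered.length = 2
      · by_cases hmem : d ∈ ordered
        · simp [h2, hmem, hsucc]
        · simp [h2, hmem]
      · simp [h2, hsucc]
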